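-- pv_equiv track=rewrite | github.com/GondorFu/Lintcode | 45.最大子数组差/Solution.py | maxDiffSubArrays
-- ===== SOURCE A (Python) =====
-- def maxDiffSubArrays(nums):
--     # write your code here
--     n = len(nums)
--     lmax, lmin, rmax, rmin = [0], [0], [0], [0]
--     for v in nums:
--         if lmax[-1] > 0:
--             lmax.append(lmax[-1] + v)
--         else:
--             lmax.append(v)
--         if lmin[-1] < 0:
--             lmin.append(lmin[-1] + v)
--         else:
--             lmin.append(v)
--
--     for v in nums[::-1]:
--         if rmax[-1] > 0:
--             rmax.append(rmax[-1] + v)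
--         else:
--             rmax.append(v)
--         if rmin[-1] < 0:
--             rmin.append(rmin[-1] + v)
--         else:
--             rmin.append(v)
--
--     rlt = 0
--     for i in range(1,n):
--         if lmax[i] - rmin[n-i] > rlt:
--             rlt = lmax[i] - rmin[n-i]
--         if rmax[n-i] - lmin[i] > rlt:
--             rlt = rmax[n-i] - lmin[i]
--     return rlt
-- ===== SOURCE B (Python) =====
-- def _ends(nums):
--     # prefix sums, then running extrema of the prefix sums:
--     # best subarray sum ending at index t is P[t+1] - min(P[0..t]) (max side),
--     # P[t+1] - max(P[0..t]) (min side); index 0 holds the seed 0 as in a fresh scan.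
--     P = [0]
--     for v in nums:
--         P.append(P[-1] + v)
--     mn = [P[0]]
--     mx = [P[0]]
--     for x in P[1:]:
--         mn.append(min(mn[-1], x))
--         mx.append(max(mx[-1], x))
--     max_end = [0] + [P[i] - mn[i - 1] for i in range(1, len(P))]
--     min_end = [0] + [P[i] - mx[i - 1] for i in range(1, len(P))]
--     return max_end, min_end
--
--
-- def maxDiffSubArrays(nums):
--     n = len(nums)
--     lmax, lmin = _ends(nums)
--     rmax, rmin = _ends(nums[::-1])
--     rlt = 0
--     for i in range(1, n):
--         rlt = max(rlt, lmax[i] - rmin[n - i], rmax[n - i] - lmin[i])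
--     return rlt
-- ===== Notes on version B (the rewrite author's own statement) =====
-- stated objective: alternative
-- what changed: B replaces A's sign-conditional Kadane recurrence for the four best-subarray-ending-here arrays by a prefix-sum scan followed by running-minimum/maximum scans (lmax[i] = P[i] - min(P[0..i-1]), etc.), keeping the same final combination loop over split points.
import Mathlib
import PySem

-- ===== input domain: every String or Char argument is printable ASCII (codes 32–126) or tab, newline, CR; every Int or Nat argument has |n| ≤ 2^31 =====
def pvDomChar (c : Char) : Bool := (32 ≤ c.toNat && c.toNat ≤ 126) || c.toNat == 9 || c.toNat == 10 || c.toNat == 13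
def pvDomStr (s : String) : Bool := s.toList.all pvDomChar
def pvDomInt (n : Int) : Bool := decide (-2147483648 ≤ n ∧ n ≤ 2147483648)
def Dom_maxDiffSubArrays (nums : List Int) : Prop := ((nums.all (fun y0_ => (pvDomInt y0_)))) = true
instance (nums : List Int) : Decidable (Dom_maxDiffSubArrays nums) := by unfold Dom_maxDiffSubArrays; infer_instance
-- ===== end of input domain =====

-- B replaces A's sign-conditional Kadane recurrence by a prefix-sum + running-extremum scan
-- (same O(n) cost, different decomposition); the final combination loop is kept.

-- ===== PORT A =====
-- one loop step of A's first/second loop: append the Kadane-style value to each list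
def pvStepMaxA (l : List Int) (v : Int) : List Int :=
  if PySem.List.pyGetD l (-1) 0 > 0 then l ++ [PySem.List.pyGetD l (-1) 0 + v] else l ++ [v]

def pvStepMinA (l : List Int) (v : Int) : List Int :=
  if PySem.List.pyGetD l (-1) 0 < 0 then l ++ [PySem.List.pyGetD l (-1) 0 + v] else l ++ [v]

-- one iteration of A's 'for v in …' loop over the pair of lists it extends
def pvLoopA (s : List Int × List Int) (v : Int) : List Int × List Int :=
  (pvStepMaxA s.1 v, pvStepMinA s.2 v)

def maxDiffSubArrays (nums : List Int) : Int :=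
  let n : Int := nums.length
  let lp := nums.foldl pvLoopA ([0], [0])          -- first loop: (lmax, lmin)
  let rp := nums.reverse.foldl pvLoopA ([0], [0])  -- second loop over nums[::-1]: (rmax, rmin)
  -- final loop; all indices are in range, so xs[i] is pyGetD (default never used)
  (PySem.List.pyRange 1 n 1).foldl (fun rlt i =>
    let rlt := if PySem.List.pyGetD lp.1 i 0 - PySem.List.pyGetD rp.2 (n - i) 0 > rlt
               then PySem.List.pyGetD lp.1 i 0 - PySem.List.pyGetD rp.2 (n - i) 0 else rlt
    if PySem.List.pyGetD rp.1 (n - i) 0 - PySem.List.pyGetD lp.2 i 0 > rlt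
    then PySem.List.pyGetD rp.1 (n - i) 0 - PySem.List.pyGetD lp.2 i 0 else rlt) 0

-- ===== PORT B =====
-- Source B's _ends: prefix sums P, running min/max of P, then the two comprehensions
def pvEnds (nums : List Int) : List Int × List Int :=
  let P := nums.scanl (· + ·) 0
  let mn := P.tail.scanl min P.headI
  let mx := P.tail.scanl max P.headI
  (0 :: P.tail.zipWith (· - ·) mn, 0 :: P.tail.zipWith (· - ·) mx)

def maxDiffSubArrays_alt (nums : List Int) : Int :=
  let n : Int := nums.length
  let lp := pvEnds nums
  let rp := pvEnds nums.reverse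
  (PySem.List.pyRange 1 n 1).foldl (fun rlt i =>
    max (max rlt (PySem.List.pyGetD lp.1 i 0 - PySem.List.pyGetD rp.2 (n - i) 0))
        (PySem.List.pyGetD rp.1 (n - i) 0 - PySem.List.pyGetD lp.2 i 0)) 0

-- ===== PRECONDITION & SPEC =====
def Spec_maxDiffSubArrays (nums : List Int) (out : Int) : Prop := out = maxDiffSubArrays_alt nums
instance (nums : List Int) (out : Int) : Decidable (Spec_maxDiffSubArrays nums out) := by unfold Spec_maxDiffSubArrays; infer_instance

-- ===== CLAIM (what is proved, stated in full; the proofs are below) =====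
def Claim_equal_maxDiffSubArrays : Prop := ∀ (nums : List Int), Dom_maxDiffSubArrays nums → Spec_maxDiffSubArrays nums (maxDiffSubArrays nums)

-- ===== LEMMAS AND PROOFS =====

-- the chain of values A's loop appends, starting from current value c
def pvChainMax (c : Int) : List Int → List Int
  | [] => []
  | v :: t => (if c > 0 then c + v else v) :: pvChainMax (if c > 0 then c + v else v) t

def pvChainMin (c : Int) : List Int → List Int
  | [] => []
  | v :: t => (if c < 0 then c + v else v) :: pvChainMin (if c < 0 then c + v else v) t

theorem foldl_stepMaxA (nums : List Int) : ∀ (acc : List Int) (c : Int),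
    nums.foldl pvStepMaxA (acc ++ [c]) = acc ++ [c] ++ pvChainMax c nums := by
  induction nums with
  | nil => simp [pvChainMax]
  | cons v t ih =>
    intro acc c
    have h : pvStepMaxA (acc ++ [c]) v
        = (acc ++ [c]) ++ [if c > 0 then c + v else v] := by
      simp [pvStepMaxA, PySem.List.pyGetD_neg_one_append_singleton]
      split_ifs <;> simp
    simp only [List.foldl_cons, h, ih, pvChainMax]
    simp

theorem foldl_stepMinA (nums : List Int) : ∀ (acc : List Int) (c : Int),
    nums.foldl pvStepMinA (acc ++ [c]) = acc ++ [c] ++ pvChainMin c nums := by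
  induction nums with
  | nil => simp [pvChainMin]
  | cons v t ih =>
    intro acc c
    have h : pvStepMinA (acc ++ [c]) v
        = (acc ++ [c]) ++ [if c < 0 then c + v else v] := by
      simp [pvStepMinA, PySem.List.pyGetD_neg_one_append_singleton]
      split_ifs <;> simp
    simp only [List.foldl_cons, h, ih, pvChainMin]
    simp

theorem foldl_loopA (nums : List Int) : ∀ (a b : List Int),
    nums.foldl pvLoopA (a, b) = (nums.foldl pvStepMaxA a, nums.foldl pvStepMinA b) := by
  induction nums with
  | nil => intro a b; rfl
  | cons v t ih => intro a b; simp only [List.foldl_cons, pvLoopA, ih]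

-- B's prefix-sum derivation computes exactly A's chain (invariant p - m = max c 0)
theorem chainMax_eq (nums : List Int) : ∀ (c p m : Int), p - m = max c 0 →
    pvChainMax c nums
      = ((nums.scanl (· + ·) p).tail).zipWith (· - ·)
          (((nums.scanl (· + ·) p).tail).scanl min m) := by
  induction nums with
  | nil => intro c p m _; simp [pvChainMax]
  | cons v t ih =>
    intro c p m h
    have hc : (if c > 0 then c + v else v) = p + v - m := by split_ifs <;> omega
    rw [show pvChainMax c (v :: t)
        = (if c > 0 then c + v else v) :: pvChainMax (if c > 0 then c + v else v) t from rfl]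
    simp only [List.scanl_cons, List.tail_cons]
    cases t with
    | nil => simp [pvChainMax, List.scanl_cons, hc]
    | cons w t' =>
      have ih' := ih (if c > 0 then c + v else v) (p + v) (min m (p + v)) (by omega)
      simp only [List.scanl_cons, List.tail_cons] at ih'
      simp only [List.scanl_cons, List.zipWith_cons_cons]
      rw [hc] at ih'
      rw [hc, ih']

theorem chainMin_eq (nums : List Int) : ∀ (c p m : Int), p - m = min c 0 →
    pvChainMin c nums
      = ((nums.scanl (· + ·) p).tail).zipWith (· - ·)
          (((nums.scanl (· + ·) p).tail).scanl max m) := by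
  induction nums with
  | nil => intro c p m _; simp [pvChainMin]
  | cons v t ih =>
    intro c p m h
    have hc : (if c < 0 then c + v else v) = p + v - m := by split_ifs <;> omega
    rw [show pvChainMin c (v :: t)
        = (if c < 0 then c + v else v) :: pvChainMin (if c < 0 then c + v else v) t from rfl]
    simp only [List.scanl_cons, List.tail_cons]
    cases t with
    | nil => simp [pvChainMin, List.scanl_cons, hc]
    | cons w t' =>
      have ih' := ih (if c < 0 then c + v else v) (p + v) (max m (p + v)) (by omega)
      simp only [List.scanl_cons, List.tail_cons] at ih'
      simp only [List.scanl_cons, List.zipWith_cons_cons]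
      rw [hc] at ih'
      rw [hc, ih']

theorem headI_scanl (f : Int → Int → Int) (b : Int) (l : List Int) :
    (List.scanl f b l).headI = b := by
  cases l <;> simp [List.scanl_cons]

theorem loopA_eq_ends (nums : List Int) :
    nums.foldl pvLoopA ([0], [0]) = pvEnds nums := by
  rw [foldl_loopA]
  have h1 := foldl_stepMaxA nums [] 0
  have h2 := foldl_stepMinA nums [] 0
  simp only [List.nil_append] at h1 h2
  rw [h1, h2, pvEnds]
  rw [chainMax_eq nums 0 0 0 (by simp), chainMin_eq nums 0 0 0 (by simp), headI_scanl]
  rfl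

theorem pvFoldlExt (f g : Int → Int → Int) (h : ∀ r i, f r i = g r i) :
    ∀ (l : List Int) (init : Int), l.foldl f init = l.foldl g init := by
  intro l
  induction l with
  | nil => intro init; rfl
  | cons x t ih => intro init; simp only [List.foldl_cons, h, ih]

theorem maxDiffSubArrays_eq (nums : List Int) :
    maxDiffSubArrays nums = maxDiffSubArrays_alt nums := by
  unfold maxDiffSubArrays maxDiffSubArrays_alt
  rw [loopA_eq_ends, loopA_eq_ends]
  exact pvFoldlExt _ _ (fun r i => by dsimp only; split_ifs <;> omega) _ _

-- ===== VERDICT (by name: the statement is the Claim_ definition above) =====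
theorem maxDiffSubArrays_spec : Claim_equal_maxDiffSubArrays := by
  intro nums _
  unfold Spec_maxDiffSubArrays
  exact maxDiffSubArrays_eq nums
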